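-- pv_equiv track=rewrite | github.com/tmu-nlp/100knock2017 | arai/chapter01/knock08.py | cipher
-- ===== SOURCE A (Python) =====
-- def cipher(str):
-- 	str2=''
-- 	for i in range(len(str)):
-- 		if 'a'<= str[i] <= 'z':
-- 			str2 += chr(219-ord(str[i]))
-- 		else:
-- 			str2 += str[i]
-- 	return str2
-- ===== SOURCE B (Python) =====
-- _TABLE = {ord(c): 219 - ord(c) for c in 'abcdefghijklmnopqrstuvwxyz'}
--
-- def cipher(str):
--     return str.translate(_TABLE)
-- ===== Notes on version B (the rewrite author's own statement) =====
-- stated objective: idiomatic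
-- what changed: Builds a 26-entry codepoint translation table once and applies it with str.translate in a single call, instead of branching on each character with arithmetic inside an index loop with string concatenation.
import Mathlib
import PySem

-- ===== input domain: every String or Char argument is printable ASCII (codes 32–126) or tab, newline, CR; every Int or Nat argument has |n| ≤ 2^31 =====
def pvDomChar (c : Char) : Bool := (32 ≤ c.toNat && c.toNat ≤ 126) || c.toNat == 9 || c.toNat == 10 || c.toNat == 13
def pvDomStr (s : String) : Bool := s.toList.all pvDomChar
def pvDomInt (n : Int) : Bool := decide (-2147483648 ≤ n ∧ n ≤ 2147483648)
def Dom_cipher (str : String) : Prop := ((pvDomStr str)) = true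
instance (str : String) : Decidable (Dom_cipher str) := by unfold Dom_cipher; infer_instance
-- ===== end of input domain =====

-- B builds a 26-entry codepoint translation table once and applies it in a single pass
-- (str.translate), instead of branching with arithmetic on each indexed character; objective: idiomatic.

-- ===== PORT A =====
def cipher (str : String) : String :=
  String.mk ((PySem.List.pyRange 0 (str.toList.length : Int) 1).foldl
    (fun acc i =>
      if 'a' ≤ PySem.List.pyGetD str.toList i ' ' ∧ PySem.List.pyGetD str.toList i ' ' ≤ 'z' then
        acc ++ [Char.ofNat (219 - (PySem.List.pyGetD str.toList i ' ').toNat)]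
      else acc ++ [PySem.List.pyGetD str.toList i ' ']) [])

-- ===== PORT B =====
-- module-level _TABLE = {ord(c): 219 - ord(c) for c in 'abcdefghijklmnopqrstuvwxyz'}
def cipherTable : PySem.Dict Nat Nat :=
  "abcdefghijklmnopqrstuvwxyz".toList.foldl
    (fun d c => d.insert c.toNat (219 - c.toNat)) PySem.Dict.empty

-- str.translate(_TABLE): map each codepoint through the table, identity on keys not present
def cipher_alt (str : String) : String :=
  String.mk (str.toList.map (fun c =>
    match cipherTable.get? c.toNat with
    | some n => Char.ofNat n
    | none => c))

-- ===== PRECONDITION & SPEC =====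
def Spec_cipher (str : String) (out : String) : Prop := out = cipher_alt str
instance (str : String) (out : String) : Decidable (Spec_cipher str out) := by unfold Spec_cipher; infer_instance

-- ===== CLAIM (what is proved, stated in full; the proofs are below) =====
def Claim_equal_cipher : Prop := ∀ (str : String), Dom_cipher str → Spec_cipher str (cipher str)

-- ===== LEMMAS AND PROOFS =====

-- the table maps exactly the codepoints 97..122, to 219 - n
set_option maxHeartbeats 2000000 in
theorem cipherTable_get? (n : Nat) :
    cipherTable.get? n = if 97 ≤ n ∧ n ≤ 122 then some (219 - n) else none := by
  by_cases h : 97 ≤ n ∧ n ≤ 122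
  · obtain ⟨h1, h2⟩ := h
    interval_cases n <;> decide
  · rw [if_neg h]
    have hk : cipherTable.keys = [97,98,99,100,101,102,103,104,105,106,107,108,109,110,
      111,112,113,114,115,116,117,118,119,120,121,122] := by decide
    rw [PySem.Dict.get?_eq_none_iff_not_mem_keys, hk]
    intro hmem
    simp only [List.mem_cons, List.not_mem_nil, or_false] at hmem
    omega

theorem char_le_iff (c : Char) : ('a' ≤ c ∧ c ≤ 'z') ↔ (97 ≤ c.toNat ∧ c.toNat ≤ 122) := by
  rw [Char.le_def, Char.le_def, UInt32.le_iff_toNat_le, UInt32.le_iff_toNat_le]; rfl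

theorem cipher_eq_alt (s : String) : cipher s = cipher_alt s := by
  unfold cipher cipher_alt
  rw [PySem.List.foldl_pyRange_zero_pyGetD' s.toList ' '
      (fun acc c => if 'a' ≤ c ∧ c ≤ 'z' then acc ++ [Char.ofNat (219 - c.toNat)] else acc ++ [c]) []]
  have h1 : ∀ (acc : List Char) (c : Char),
      (if 'a' ≤ c ∧ c ≤ 'z' then acc ++ [Char.ofNat (219 - c.toNat)] else acc ++ [c])
      = acc ++ [if 'a' ≤ c ∧ c ≤ 'z' then Char.ofNat (219 - c.toNat) else c] := by
    intro acc c; split <;> rfl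
  simp only [h1, PySem.List.foldl_append_singleton_eq_map, List.nil_append]
  congr 1
  apply List.map_congr_left
  intro c _
  rw [cipherTable_get?]
  by_cases hc : 97 ≤ c.toNat ∧ c.toNat ≤ 122
  · rw [if_pos hc, if_pos ((char_le_iff c).mpr hc)]
  · rw [if_neg hc, if_neg (fun h => hc ((char_le_iff c).mp h))]

-- ===== VERDICT (by name: the statement is the Claim_ definition above) =====
theorem cipher_spec : Claim_equal_cipher := by
  intro s _
  exact cipher_eq_alt s
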